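-- pv_equiv track=rewrite | github.com/ychateauvert/advent_of_code | 2018/day_06.py | safest_region
-- ===== SOURCE A (Python) =====
-- def grid_limits(coordinates):
--     """
--     :param coordinates:
--     :return:
--     >>> grid_limits([(1, 1), (1, 6), (8, 3), (3, 4), (5, 5), (8, 9)])
--     (1, 8, 1, 9)
--     """
--     min_x = min(map(lambda x: x[0], coordinates))
--     max_x = max(map(lambda x: x[0], coordinates))
--     min_y = min(map(lambda x: x[1], coordinates))
--     max_y = max(map(lambda x: x[1], coordinates))
--
--     return min_x, max_x, min_y, max_y
--
-- def manhattan_distance(a, b):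
--     """
--
--     :param a:
--     :param b:
--     :return:
--     >>> manhattan_distance((5, 1), (1, 1))
--     4
--     """
--     return abs(a[0] - b[0]) + abs(a[1] - b[1])
--
-- def is_within_distance(max_distance, coordinates):
--     """
--
--     :param max_distance:
--     :param coordinates:
--     :return:
--     >>> is_within_distance(32, [(1, 1), (1, 6), (8, 3), (3, 4), (5, 5), (8, 9)])((4, 3))
--     True
--     """
--     return lambda location: sum(manhattan_distance(x, location) for x in coordinates) < max_distance
--
-- def safest_region(coordinates, max_distance):
--     """
--
--     :param coordinates:
--     :return:
--     >>> safest_region([(1, 1), (1, 6), (8, 3), (3, 4), (5, 5), (8, 9)], 32)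
--     16
--     """
--     within_radius = is_within_distance(max_distance, coordinates)
--     position = []
--     min_x, max_x, min_y, max_y = grid_limits(coordinates)
--     for y in range(min_y, max_y):
--         for x in range(min_x, max_x):
--             if within_radius((x, y)):
--                 position.append((x, y))
--
--     return len(position)
-- ===== SOURCE B (Python) =====
-- def safest_region(coordinates, max_distance):
--     xs = [c[0] for c in coordinates]
--     ys = [c[1] for c in coordinates]
--     min_x, max_x = min(xs), max(xs)
--     min_y, max_y = min(ys), max(ys)
--     # precompute per-column distance sums once (Manhattan distance separates into x and y parts)
--     col = [sum(abs(xi - x) for xi in xs) for x in range(min_x, max_x)]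
--     total = 0
--     for y in range(min_y, max_y):
--         t = max_distance - sum(abs(yi - y) for yi in ys)
--         total += sum(1 for c in col if c < t)
--     return total
-- ===== Notes on version B (the rewrite author's own statement) =====
-- stated objective: faster
-- what changed: B splits the Manhattan sum into separate x- and y-distance sums, precomputes the per-column sums once, and counts per row against a shifted threshold, instead of re-summing the distance to all N coordinates at every grid cell.
import Mathlib
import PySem

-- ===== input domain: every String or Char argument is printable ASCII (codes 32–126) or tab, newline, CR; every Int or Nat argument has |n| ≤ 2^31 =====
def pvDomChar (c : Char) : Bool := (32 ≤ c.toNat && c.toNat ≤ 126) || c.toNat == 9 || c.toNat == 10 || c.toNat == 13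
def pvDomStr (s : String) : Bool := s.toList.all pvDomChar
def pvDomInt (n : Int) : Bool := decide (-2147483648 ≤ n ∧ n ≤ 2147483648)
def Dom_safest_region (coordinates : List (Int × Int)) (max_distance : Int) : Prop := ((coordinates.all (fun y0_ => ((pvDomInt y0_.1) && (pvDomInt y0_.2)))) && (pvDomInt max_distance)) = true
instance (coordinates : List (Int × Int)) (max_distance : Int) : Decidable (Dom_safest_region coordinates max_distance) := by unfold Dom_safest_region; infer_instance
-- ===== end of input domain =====

-- B precomputes separated per-column/per-row distance sums instead of summing the
-- distance to all N coordinates at every grid cell (objective: faster).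

-- ===== PORT A =====
-- manhattan_distance(a, b)
def pvManhattan (a b : Int × Int) : Int := |a.1 - b.1| + |a.2 - b.2|

-- grid_limits(coordinates); min/max of an empty list raise in Python (excluded by Pre_), getD 0 there
def pvGridLimits (coordinates : List (Int × Int)) : Int × Int × Int × Int :=
  ((PySem.List.min? (coordinates.map (fun x => x.1)) (fun v => v)).getD 0,
   (PySem.List.max? (coordinates.map (fun x => x.1)) (fun v => v)).getD 0,
   (PySem.List.min? (coordinates.map (fun x => x.2)) (fun v => v)).getD 0,
   (PySem.List.max? (coordinates.map (fun x => x.2)) (fun v => v)).getD 0)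

-- is_within_distance(max_distance, coordinates)(location)
def pvWithin (max_distance : Int) (coordinates : List (Int × Int)) (location : Int × Int) : Bool :=
  decide ((coordinates.map (fun x => pvManhattan x location)).sum < max_distance)

def safest_region (coordinates : List (Int × Int)) (max_distance : Int) : Int :=
  let gl := pvGridLimits coordinates
  let position : List (Int × Int) :=
    (PySem.List.pyRange gl.2.2.1 gl.2.2.2 1).foldl (fun acc y =>
      (PySem.List.pyRange gl.1 gl.2.1 1).foldl (fun acc2 x =>
        if pvWithin max_distance coordinates (x, y) then acc2 ++ [(x, y)] else acc2) acc) []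
  (position.length : Int)

-- ===== PORT B =====
def safest_region_alt (coordinates : List (Int × Int)) (max_distance : Int) : Int :=
  let xs := coordinates.map (fun c => c.1)
  let ys := coordinates.map (fun c => c.2)
  let min_x := (PySem.List.min? xs (fun v => v)).getD 0
  let max_x := (PySem.List.max? xs (fun v => v)).getD 0
  let min_y := (PySem.List.min? ys (fun v => v)).getD 0
  let max_y := (PySem.List.max? ys (fun v => v)).getD 0
  let col := (PySem.List.pyRange min_x max_x 1).map (fun x => (xs.map (fun xi => |xi - x|)).sum)
  (PySem.List.pyRange min_y max_y 1).foldl (fun total y =>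
    total + ((col.countP (fun c => decide (c < max_distance - (ys.map (fun yi => |yi - y|)).sum))) : Int)) 0

-- ===== PRECONDITION & SPEC =====
-- Pre_ excludes only the empty coordinate list, on which Python's min raises ValueError.
def Pre_safest_region (coordinates : List (Int × Int)) (max_distance : Int) : Prop := coordinates ≠ []
instance (coordinates : List (Int × Int)) (max_distance : Int) : Decidable (Pre_safest_region coordinates max_distance) := by unfold Pre_safest_region; infer_instance
def pvWitness_safest_region : (List (Int × Int)) × Int := ([(1, 1), (1, 6), (8, 3), (3, 4), (5, 5), (8, 9)], 32)

def Spec_safest_region (coordinates : List (Int × Int)) (max_distance : Int) (out : Int) : Prop := out = safest_region_alt coordinates max_distance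
instance (coordinates : List (Int × Int)) (max_distance : Int) (out : Int) : Decidable (Spec_safest_region coordinates max_distance out) := by unfold Spec_safest_region; infer_instance

-- ===== CLAIM (what is proved, stated in full; the proofs are below) =====
def Claim_equal_safest_region : Prop := ∀ (coordinates : List (Int × Int)) (max_distance : Int), Dom_safest_region coordinates max_distance → Pre_safest_region coordinates max_distance → Spec_safest_region coordinates max_distance (safest_region coordinates max_distance)

-- ===== LEMMAS AND PROOFS =====

-- the Manhattan sum over coordinates separates into an x-part and a y-part
theorem manhattan_sum_split (c : List (Int × Int)) (x y : Int) :
    (c.map (fun p => pvManhattan p (x, y))).sum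
      = ((c.map (fun p => p.1)).map (fun xi => |xi - x|)).sum
        + ((c.map (fun p => p.2)).map (fun yi => |yi - y|)).sum := by
  simp only [List.map_map, Function.comp_def, pvManhattan]
  induction c with
  | nil => simp
  | cons h t ih => simp [ih]; ring

-- count of the filtered row in A equals B's per-row count over the precomputed column sums
theorem row_count_eq (c : List (Int × Int)) (m a b y : Int) :
    (((PySem.List.pyRange a b 1).filter (fun x => pvWithin m c (x, y))).map (fun x => (x, y))).length
      = ((PySem.List.pyRange a b 1).map
           (fun x => ((c.map (fun p => p.1)).map (fun xi => |xi - x|)).sum)).countP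
          (fun v => decide (v < m - ((c.map (fun p => p.2)).map (fun yi => |yi - y|)).sum)) := by
  rw [List.length_map, ← List.countP_eq_length_filter, List.countP_map]
  apply List.countP_congr
  intro x _
  simp only [pvWithin, Function.comp_def]
  rw [manhattan_sum_split]
  simp only [decide_eq_true_eq]
  omega

-- A's nested append loop, measured, is the per-row counts summed over the rows
theorem a_len (c : List (Int × Int)) (m a b : Int) (L : List Int) (acc : List (Int × Int)) :
    ((L.foldl (fun acc y => (PySem.List.pyRange a b 1).foldl
        (fun acc2 x => if pvWithin m c (x, y) then acc2 ++ [(x, y)] else acc2) acc) acc).length : Int)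
    = acc.length + (L.map (fun y =>
        ((((PySem.List.pyRange a b 1).map (fun x => ((c.map (fun p => p.1)).map (fun xi => |xi - x|)).sum)).countP
          (fun v => decide (v < m - ((c.map (fun p => p.2)).map (fun yi => |yi - y|)).sum)) : Nat) : Int))).sum := by
  induction L generalizing acc with
  | nil => simp
  | cons y L ih =>
    simp only [List.foldl_cons, List.map_cons, List.sum_cons]
    rw [PySem.List.foldl_append_if, ih, List.length_append, row_count_eq]
    push_cast
    ring

-- ===== VERDICT (by name: the statement is the Claim_ definition above) =====
theorem safest_region_spec : Claim_equal_safest_region := by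
  intro c m _ _
  show safest_region c m = safest_region_alt c m
  unfold safest_region safest_region_alt pvGridLimits
  simp only []
  rw [a_len, PySem.List.foldl_add]
  norm_num
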